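-- pv_equiv track=rewrite | github.com/spyroot/warlock | tests/tests_esxI_read_state.py | verify_values_seq
-- ===== SOURCE A (Python) =====
-- def verify_values_seq(data):
--     values = list(data.values())
--     numeric_values = [v for v in values if isinstance(v, int)]
--     sorted_values = sorted(numeric_values)
--     for i in range(len(sorted_values)):
--         if sorted_values[i] != i:
--             return False
--     return True
-- ===== SOURCE B (Python) =====
-- def verify_values_seq(data):
--     numeric_values = [v for v in data.values() if isinstance(v, int)]
--     n = len(numeric_values)
--     seen = [False] * n
--     for v in numeric_values:
--         if v < 0 or v >= n or seen[v]:
--             return False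
--         seen[v] = True
--     return True
-- ===== Notes on version B (the rewrite author's own statement) =====
-- stated objective: faster
-- what changed: Replaces sort-then-compare-with-index by a single pass that bucket-marks each value in a fixed-size boolean table, rejecting on out-of-range or repeated values.
import Mathlib
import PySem

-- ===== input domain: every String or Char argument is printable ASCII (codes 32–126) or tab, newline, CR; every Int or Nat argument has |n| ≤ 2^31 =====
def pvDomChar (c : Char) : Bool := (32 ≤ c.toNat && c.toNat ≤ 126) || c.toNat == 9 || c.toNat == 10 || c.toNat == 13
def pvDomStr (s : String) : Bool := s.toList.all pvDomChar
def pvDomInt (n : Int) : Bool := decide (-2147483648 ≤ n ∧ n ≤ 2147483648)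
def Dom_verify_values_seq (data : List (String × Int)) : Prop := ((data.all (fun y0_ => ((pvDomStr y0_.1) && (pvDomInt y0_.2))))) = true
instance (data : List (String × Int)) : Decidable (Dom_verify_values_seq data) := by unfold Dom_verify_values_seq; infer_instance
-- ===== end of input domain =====

-- B replaces A's sort-and-compare-with-index by a single pass that bucket-marks each value in a
-- fixed-size boolean table, rejecting out-of-range or repeated values (same return value everywhere).

-- ===== PORT A =====
-- the 'for i in range(len(sorted_values)): if sorted_values[i] != i: return False' loop:
-- walk the sorted list with the running index i (indexing sorted_values[i] step for step)
def pvALoop : List Int → Int → Bool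
  | [], _ => true
  | x :: rest, i => if x ≠ i then false else pvALoop rest (i + 1)

def verify_values_seq (data : List (String × Int)) : Bool :=
  let values := (PySem.Dict.ofList data).values
  let numeric_values := values.filter (fun _v => true)  -- isinstance(v, int) is True for every Int value
  let sorted_values := PySem.List.sorted numeric_values (fun v => v) false
  pvALoop sorted_values 0

-- ===== PORT B =====
-- the marking loop of Source B; after the bound guard 0 ≤ v < n = seen.length, so getD/set at
-- v.toNat is exactly Python's seen[v] read/write
def pvBLoop (n : Int) : List Int → List Bool → Bool
  | [], _ => true
  | v :: rest, seen =>
    if v < 0 || n ≤ v then false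
    else if seen.getD v.toNat false then false
    else pvBLoop n rest (seen.set v.toNat true)

def verify_values_seq_alt (data : List (String × Int)) : Bool :=
  let numeric_values := ((PySem.Dict.ofList data).values).filter (fun _v => true)
  let n := numeric_values.length
  pvBLoop (n : Int) numeric_values (List.replicate n false)

-- ===== PRECONDITION & SPEC =====
def Spec_verify_values_seq (data : List (String × Int)) (out : Bool) : Prop := out = verify_values_seq_alt data
instance (data : List (String × Int)) (out : Bool) : Decidable (Spec_verify_values_seq data out) := by unfold Spec_verify_values_seq; infer_instance

-- ===== CLAIM (what is proved, stated in full; the proofs are below) =====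
def Claim_equal_verify_values_seq : Prop := ∀ (data : List (String × Int)), Dom_verify_values_seq data → Spec_verify_values_seq data (verify_values_seq data)

-- ===== LEMMAS AND PROOFS =====

-- A's loop succeeds iff the list it walks is exactly k, k+1, k+2, …
theorem pvALoop_iff (l : List Int) (k : Int) :
    pvALoop l k = true ↔ l = (List.range l.length).map (fun j : Nat => k + (j : Int)) := by
  induction l generalizing k with
  | nil => simp [pvALoop]
  | cons x rest ih =>
    have hf : ((fun j : Nat => k + (j : Int)) ∘ Nat.succ) = (fun j : Nat => (k + 1) + (j : Int)) := by
      funext j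
      show k + ((Nat.succ j : Nat) : Int) = (k + 1) + (j : Int)
      push_cast
      ring
    simp only [pvALoop, List.length_cons, List.range_succ_eq_map, List.map_cons, List.map_map, hf]
    by_cases hx : x = k
    · subst hx
      simp [ih]
    · rw [if_pos hx]
      refine iff_of_false (by simp) ?_
      intro h
      obtain ⟨h1, -⟩ := List.cons_eq_cons.mp h
      exact hx (by rw [h1]; simp)

theorem getD_set_true (seen : List Bool) (i j : Nat) (hi : i < seen.length) :
    (seen.set i true).getD j false = if j = i then true else seen.getD j false := by
  simp only [List.getD_eq_getElem?_getD, List.getElem?_set, hi, if_true]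
  by_cases h : j = i
  · simp [h]
  · simp [h, Ne.symm h]

-- B's loop succeeds iff the remaining values are distinct, in range, and not yet marked
theorem pvBLoop_iff (n : Int) (l : List Int) (seen : List Bool) (hlen : (seen.length : Int) = n) :
    pvBLoop n l seen = true ↔
      l.Nodup ∧ ∀ v ∈ l, 0 ≤ v ∧ v < n ∧ seen.getD v.toNat false = false := by
  induction l generalizing seen with
  | nil => simp [pvBLoop]
  | cons v rest ih =>
    simp only [pvBLoop]
    by_cases h1 : v < 0 ∨ n ≤ v
    · have hg : (v < 0 || n ≤ v) = true := by
        rcases h1 with h | h <;> simp [h]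
      rw [hg]
      simp only [if_true, Bool.false_eq_true, false_iff]
      rintro ⟨-, hall⟩
      obtain ⟨h0, hn, -⟩ := hall v (List.mem_cons_self ..)
      omega
    · have h0 : 0 ≤ v := by omega
      have hn : v < n := by omega
      have hguard : (v < 0 || n ≤ v) = false := by
        simp; omega
      rw [hguard]
      simp only [Bool.false_eq_true, if_false]
      have hvlt : v.toNat < seen.length := by omega
      by_cases h2 : seen.getD v.toNat false = true
      · simp only [h2, if_true, Bool.false_eq_true, false_iff]
        rintro ⟨-, hall⟩
        obtain ⟨-, -, hfalse⟩ := hall v (List.mem_cons_self ..)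
        rw [h2] at hfalse
        exact Bool.noConfusion hfalse
      · rw [Bool.not_eq_true] at h2
        simp only [h2, Bool.false_eq_true, if_false]
        rw [ih (seen.set v.toNat true) (by simpa using hlen)]
        constructor
        · rintro ⟨hnd, hall⟩
          have hvnot : v ∉ rest := by
            intro hv
            obtain ⟨-, -, hf⟩ := hall v hv
            rw [getD_set_true seen v.toNat v.toNat hvlt] at hf
            simp at hf
          refine ⟨List.nodup_cons.mpr ⟨hvnot, hnd⟩, ?_⟩
          intro w hw
          rcases List.mem_cons.mp hw with hw | hw
          · subst hw; exact ⟨h0, hn, h2⟩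
          · obtain ⟨hw0, hwn, hf⟩ := hall w hw
            rw [getD_set_true seen v.toNat w.toNat hvlt] at hf
            refine ⟨hw0, hwn, ?_⟩
            by_cases he : w.toNat = v.toNat
            · rw [he] at hf; simp at hf
            · rwa [if_neg he] at hf
        · rintro ⟨hnd, hall⟩
          obtain ⟨hvnot, hnd'⟩ := List.nodup_cons.mp hnd
          refine ⟨hnd', ?_⟩
          intro w hw
          obtain ⟨hw0, hwn, hf⟩ := hall w (List.mem_cons_of_mem _ hw)
          refine ⟨hw0, hwn, ?_⟩
          rw [getD_set_true seen v.toNat w.toNat hvlt]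
          have hne : w.toNat ≠ v.toNat := by
            intro he
            have : w = v := by omega
            exact hvnot (this ▸ hw)
          rwa [if_neg hne]

-- the core equivalence, over an arbitrary list of values
theorem pvMain (vs : List Int) :
    pvALoop (PySem.List.sorted vs (fun v => v) false) 0
      = pvBLoop (vs.length : Int) vs (List.replicate vs.length false) := by
  rw [Bool.eq_iff_iff, pvALoop_iff,
      pvBLoop_iff (vs.length : Int) vs _ (by simp)]
  have hperm : (PySem.List.sorted vs (fun v => v) false).Perm vs := PySem.List.sorted_perm ..
  have hlen : (PySem.List.sorted vs (fun v => v) false).length = vs.length :=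
    hperm.length_eq
  rw [hlen]
  have hrepl : ∀ v : Int, (List.replicate vs.length false).getD v.toNat false = false := by
    intro v
    rw [List.getD_eq_getElem?_getD, List.getElem?_replicate]
    split <;> rfl
  constructor
  · intro h
    have hperm2 : vs.Perm ((List.range vs.length).map (fun j : Nat => (0 : Int) + (j : Int))) := by
      rw [← h]; exact hperm.symm
    have hnodR : ((List.range vs.length).map (fun j : Nat => (0 : Int) + (j : Int))).Nodup := by
      refine List.Nodup.map ?_ List.nodup_range
      intro a b hab
      simpa using hab
    refine ⟨hperm2.nodup_iff.mpr hnodR, ?_⟩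
    intro v hv
    have hvR := hperm2.mem_iff.mp hv
    obtain ⟨j, hj, hje⟩ := List.mem_map.mp hvR
    have hj' := List.mem_range.mp hj
    refine ⟨by omega, by omega, hrepl v⟩
  · rintro ⟨hnd, hall⟩
    have hsub : vs ⊆ (List.range vs.length).map (fun j : Nat => (0 : Int) + (j : Int)) := by
      intro v hv
      obtain ⟨hv0, hvn, -⟩ := hall v hv
      refine List.mem_map.mpr ⟨v.toNat, List.mem_range.mpr (by omega), ?_⟩
      show (0 : Int) + (v.toNat : Int) = v
      omega
    have hperm2 : vs.Perm ((List.range vs.length).map (fun j : Nat => (0 : Int) + (j : Int))) :=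
      (hnd.subperm hsub).perm_of_length_le (by simp)
    have hpw : ((List.range vs.length).map (fun j : Nat => (0 : Int) + (j : Int))).Pairwise
        (fun a b => (fun v => v) a < (fun v => v) b) := by
      refine List.Pairwise.map _ ?_ List.pairwise_lt_range
      intro a b hab
      simpa using hab
    exact PySem.List.sorted_eq_of_perm_of_pairwise_lt vs _ (fun v => v) hperm2.symm hpw

-- ===== VERDICT (by name: the statement is the Claim_ definition above) =====
theorem verify_values_seq_spec : Claim_equal_verify_values_seq := by
  intro data _
  unfold Spec_verify_values_seq verify_values_seq verify_values_seq_alt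
  exact pvMain _
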